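-- pv_equiv track=rewrite | github.com/cyberops7/mcrcon | src/mcrcon/help_parser.py | format_help_response
-- ===== SOURCE A (Python) =====
-- def format_help_response(body: str) -> str:
--     """Fix formatting of help output from the server.
--
--     The server often concatenates lines, so we insert newlines before '/'
--     characters that aren't at the start of a line to separate commands.
--     """
--     fixed = []
--     prev = None
--     for char in body:
--         if char == "/" and prev is not None and prev != "\n":
--             fixed.append("\n")
--         fixed.append(char)
--         prev = char
--     return "".join(fixed).strip()
-- ===== SOURCE B (Python) =====
-- def format_help_response(body: str) -> str:
--     """Two staged global rewrites instead of a char loop: put a newline before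
--     every '/', then collapse the doubled newline where the slash already
--     followed one; strip removes the spurious leading newline of a leading '/'."""
--     return body.replace("/", "\n/").replace("\n\n/", "\n/").strip()
-- ===== Notes on version B (the rewrite author's own statement) =====
-- stated objective: faster
-- what changed: Replaces the stateful char-by-char accumulator loop with two global string rewrites: insert a newline before every '/', then collapse the doubled newline where the slash already followed one (strip eats the spurious leading newline of a leading slash).
import Mathlib
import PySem

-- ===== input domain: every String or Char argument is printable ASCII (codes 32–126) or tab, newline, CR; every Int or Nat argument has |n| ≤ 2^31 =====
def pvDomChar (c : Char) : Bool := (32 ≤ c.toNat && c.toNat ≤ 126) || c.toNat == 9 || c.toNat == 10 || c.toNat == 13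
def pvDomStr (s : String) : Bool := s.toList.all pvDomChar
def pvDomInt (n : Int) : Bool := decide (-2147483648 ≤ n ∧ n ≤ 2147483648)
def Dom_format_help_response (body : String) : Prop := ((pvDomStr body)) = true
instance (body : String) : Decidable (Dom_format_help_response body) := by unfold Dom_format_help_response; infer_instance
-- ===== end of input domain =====

-- B replaces A's stateful char-by-char accumulator loop with two staged global
-- rewrites: insert '\n' before every '/', then collapse the doubled '\n' where
-- the slash already followed one (objective: faster, measured).

-- ===== PORT A =====
-- A's loop: state = (fixed, prev); branch order and appends as in the Python.
def pvStepA (st : List Char × Option Char) (c : Char) : List Char × Option Char :=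
  let fixed :=
    if c = '/' ∧ st.2 ≠ none ∧ st.2 ≠ some '\n' then st.1 ++ ['\n', c]
    else st.1 ++ [c]
  (fixed, some c)

def format_help_response (body : String) : String :=
  PySem.Str.strip (String.ofList (body.toList.foldl pvStepA ([], none)).1)

-- ===== PORT B =====
def format_help_response_alt (body : String) : String :=
  PySem.Str.strip (PySem.Str.replace (PySem.Str.replace body "/" "\n/") "\n\n/" "\n/")

-- ===== PRECONDITION & SPEC =====
def Spec_format_help_response (body : String) (out : String) : Prop := out = format_help_response_alt body
instance (body : String) (out : String) : Decidable (Spec_format_help_response body out) := by unfold Spec_format_help_response; infer_instance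

-- ===== CLAIM (what is proved, stated in full; the proofs are below) =====
def Claim_equal_format_help_response : Prop := ∀ (body : String), Dom_format_help_response body → Spec_format_help_response body (format_help_response body)

-- ===== LEMMAS AND PROOFS =====

-- what A's loop emits, as a structural recursion with the prev character as parameter
def pvIns : Option Char → List Char → List Char
  | _, [] => []
  | p, c :: t => (if c = '/' ∧ p ≠ none ∧ p ≠ some '\n' then ['\n', c] else [c]) ++ pvIns (some c) t

-- structural form of body.replace("/", "\n/")
def pvR1 : List Char → List Char
  | [] => []
  | c :: t => if c = '/' then '\n' :: '/' :: pvR1 t else c :: pvR1 t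

-- structural form of s.replace("\n\n/", "\n/")
def pvR2 : List Char → List Char
  | [] => []
  | c :: t =>
    if c = '\n' ∧ t.take 2 = ['\n', '/'] then '\n' :: '/' :: pvR2 (t.drop 2)
    else c :: pvR2 t
termination_by l => l.length
decreasing_by
  all_goals simp

theorem pvFoldA (cs : List Char) : ∀ (acc : List Char) (p : Option Char),
    (cs.foldl pvStepA (acc, p)).1 = acc ++ pvIns p cs := by
  induction cs with
  | nil => intro acc p; simp [pvIns]
  | cons c t ih =>
    intro acc p
    simp only [List.foldl_cons, pvStepA, pvIns]
    by_cases h : c = '/' ∧ p ≠ none ∧ p ≠ some '\n'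
    · simp only [if_pos h]; rw [ih]; simp
    · simp only [if_neg h]; rw [ih]; simp

theorem pvGo1 (fuel : Nat) : ∀ (l acc : List Char), l.length ≤ fuel →
    PySem.Chars.replace.go ['/'] ['\n', '/'] fuel l acc = acc.reverse ++ pvR1 l := by
  induction fuel with
  | zero =>
    intro l acc h
    have : l = [] := List.eq_nil_of_length_eq_zero (Nat.le_zero.mp h)
    subst this; simp [PySem.Chars.replace.go, pvR1]
  | succ n ih =>
    intro l acc h
    cases l with
    | nil => simp [PySem.Chars.replace.go, pvR1]
    | cons c t =>
      rw [PySem.Chars.replace.go]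
      by_cases hc : c = '/'
      · subst hc
        simp only [List.isPrefixOf, Bool.and_true, beq_self_eq_true, if_pos]
        rw [ih]
        · simp [pvR1]
        · simpa using Nat.le_of_succ_le_succ h
      · have hpre : (['/'].isPrefixOf (c :: t)) = false := by
          rw [Bool.eq_false_iff]
          intro hcon
          rw [List.isPrefixOf_iff_prefix, List.prefix_iff_eq_take] at hcon
          simp at hcon
          exact hc hcon.symm
        rw [hpre]
        simp only [Bool.false_eq_true, if_false]
        rw [ih t (c :: acc) (by simpa using Nat.le_of_succ_le_succ h)]
        simp [pvR1, hc]

theorem pvGo2 (fuel : Nat) : ∀ (l acc : List Char), l.length ≤ fuel →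
    PySem.Chars.replace.go ['\n', '\n', '/'] ['\n', '/'] fuel l acc = acc.reverse ++ pvR2 l := by
  induction fuel with
  | zero =>
    intro l acc h
    have : l = [] := List.eq_nil_of_length_eq_zero (Nat.le_zero.mp h)
    subst this; simp [PySem.Chars.replace.go, pvR2]
  | succ n ih =>
    intro l acc h
    cases l with
    | nil => simp [PySem.Chars.replace.go, pvR2]
    | cons c t =>
      rw [PySem.Chars.replace.go]
      by_cases hp : c = '\n' ∧ t.take 2 = ['\n', '/']
      · have hpre : (['\n', '\n', '/'].isPrefixOf (c :: t)) = true := by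
          rw [List.isPrefixOf_iff_prefix, List.prefix_iff_eq_take]
          simp [List.take_succ_cons, hp.1, hp.2]
        rw [hpre]
        simp only [if_pos]
        have hdrop : List.drop (['\n', '\n', '/'].length) (c :: t) = t.drop 2 := by simp
        rw [hdrop, ih (t.drop 2) _ (by simp at h ⊢; omega)]
        rw [pvR2]
        simp [hp]
      · have hpre : (['\n', '\n', '/'].isPrefixOf (c :: t)) = false := by
          rw [Bool.eq_false_iff]
          intro hcon
          rw [List.isPrefixOf_iff_prefix, List.prefix_iff_eq_take] at hcon
          simp at hcon
          obtain ⟨h1, h2⟩ := hcon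
          exact hp ⟨h1.symm, by first | exact h2 | exact h2.symm⟩
        rw [hpre]
        simp only [Bool.false_eq_true, if_false]
        rw [ih t (c :: acc) (by simpa using Nat.le_of_succ_le_succ h)]
        rw [pvR2]
        simp [hp]

theorem pvRep1 (cs : List Char) : PySem.Chars.replace cs ['/'] ['\n', '/'] = pvR1 cs := by
  rw [PySem.Chars.replace]
  simp only [List.isEmpty_cons, Bool.false_eq_true, if_false]
  simpa using pvGo1 cs.length cs [] le_rfl

theorem pvRep2 (cs : List Char) : PySem.Chars.replace cs ['\n', '\n', '/'] ['\n', '/'] = pvR2 cs := by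
  rw [PySem.Chars.replace]
  simp only [List.isEmpty_cons, Bool.false_eq_true, if_false]
  simpa using pvGo2 cs.length cs [] le_rfl

theorem pvR1_head (u : List Char) : (pvR1 u).head? ≠ some '/' := by
  cases u with
  | nil => simp [pvR1]
  | cons c t =>
    by_cases hc : c = '/'
    · simp [pvR1, hc]
    · simp [pvR1, hc]

theorem pvR1_take2 (t : List Char) (h : t.head? ≠ some '/') :
    (pvR1 t).take 2 ≠ ['\n', '/'] := by
  cases t with
  | nil => simp [pvR1]
  | cons d u =>
    have hd : d ≠ '/' := by simpa using h
    rw [show pvR1 (d :: u) = d :: pvR1 u by simp [pvR1, hd]]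
    rw [List.take_succ_cons]
    intro hcon
    injection hcon with h1 h2
    apply pvR1_head u
    cases hu : pvR1 u with
    | nil => rw [hu] at h2; simp at h2
    | cons e v =>
      rw [hu] at h2
      simp at h2
      simp [h2]

theorem pvMain : ∀ (n : Nat) (cs : List Char) (p : Option Char), cs.length ≤ n →
    (cs.head? = some '/' → p ≠ none ∧ p ≠ some '\n') →
    pvR2 (pvR1 cs) = pvIns p cs := by
  intro n
  induction n with
  | zero =>
    intro cs p h _
    have : cs = [] := List.eq_nil_of_length_eq_zero (Nat.le_zero.mp h)
    subst this; simp [pvR1, pvR2, pvIns]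
  | succ n ih =>
    intro cs p h hp
    cases cs with
    | nil => simp [pvR1, pvR2, pvIns]
    | cons c t =>
      by_cases hc : c = '/'
      · subst hc
        obtain ⟨hp1, hp2⟩ := hp rfl
        rw [show pvR1 ('/' :: t) = '\n' :: '/' :: pvR1 t by simp [pvR1]]
        rw [pvR2, if_neg (by simp)]
        rw [pvR2, if_neg (by simp)]
        rw [pvIns, if_pos ⟨rfl, hp1, hp2⟩]
        have := ih t (some '/') (by simpa using Nat.le_of_succ_le_succ h)
          (fun _ => ⟨by simp, by simp⟩)
        rw [this]
        simp
      · by_cases hn : c = '\n'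
        · subst hn
          cases ht : t with
          | nil =>
            simp [pvR1, pvR2, pvIns]
          | cons d t' =>
            by_cases hd : d = '/'
            · subst hd; subst ht
              rw [show pvR1 ('\n' :: '/' :: t') = '\n' :: '\n' :: '/' :: pvR1 t' by
                simp [pvR1]]
              rw [pvR2, if_pos ⟨rfl, by simp⟩]
              rw [show List.drop 2 ('\n' :: '/' :: pvR1 t') = pvR1 t' by simp]
              have := ih t' (some '/') (by simp at h ⊢; omega)
                (fun _ => ⟨by simp, by simp⟩)
              rw [this]
              rw [pvIns, if_neg (by simp)]
              rw [pvIns, if_neg (by simp)]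
              simp
            · subst ht
              rw [show pvR1 ('\n' :: d :: t') = '\n' :: pvR1 (d :: t') by simp [pvR1]]
              rw [pvR2, if_neg (fun hcon => pvR1_take2 (d :: t') (by simpa using hd) hcon.2)]
              have := ih (d :: t') (some '\n') (by simpa using Nat.le_of_succ_le_succ h)
                (fun hh => absurd (by simpa using hh) hd)
              rw [this]
              simp [pvIns, hd]
        · rw [show pvR1 (c :: t) = c :: pvR1 t by simp [pvR1, hc]]
          rw [pvR2, if_neg (fun hcon => hn hcon.1)]
          have := ih t (some c) (by simpa using Nat.le_of_succ_le_succ h)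
            (fun _ => ⟨by simp, by simp [hn]⟩)
          rw [this]
          rw [pvIns, if_neg (fun hcon => hc hcon.1)]
          simp

-- strip absorbs one leading newline
theorem pvStrip_newline (x : List Char) :
    PySem.Chars.strip ('\n' :: x) = PySem.Chars.strip x := by
  have hs : PySem.Chars.isspace '\n' = true := by decide
  simp [PySem.Chars.strip, PySem.Chars.lstrip, List.dropWhile, hs]

theorem pvStripEq (cs : List Char) :
    PySem.Chars.strip (pvR2 (pvR1 cs)) = PySem.Chars.strip (pvIns none cs) := by
  cases cs with
  | nil => simp [pvR1, pvR2, pvIns]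
  | cons c t =>
    by_cases hc : c = '/'
    · subst hc
      rw [show pvR1 ('/' :: t) = '\n' :: '/' :: pvR1 t by simp [pvR1]]
      rw [pvR2, if_neg (by simp)]
      rw [pvR2, if_neg (by simp)]
      rw [pvMain t.length t (some '/') le_rfl (fun _ => ⟨by simp, by simp⟩)]
      rw [pvIns, if_neg (by simp)]
      rw [pvStrip_newline]
      simp
    · rw [pvMain (c :: t).length (c :: t) none le_rfl
        (fun hh => absurd (by simpa using hh) hc)]

-- ===== VERDICT (by name: the statement is the Claim_ definition above) =====
theorem format_help_response_spec : Claim_equal_format_help_response := by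
  intro body _
  unfold Spec_format_help_response format_help_response format_help_response_alt
  rw [pvFoldA body.toList [] none]
  rw [show PySem.Str.strip = fun s => String.ofList (PySem.Chars.strip s.toList) from rfl]
  simp only [String.toList_ofList, PySem.Str.toList_replace, List.nil_append]
  rw [show ("/" : String).toList = ['/'] from rfl,
      show ("\n/" : String).toList = ['\n', '/'] from rfl,
      show ("\n\n/" : String).toList = ['\n', '\n', '/'] from rfl]
  rw [pvRep1, pvRep2, pvStripEq]
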